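-- pv_equiv track=rewrite | github.com/justjot-ai/jotty | kaggle_demo/demo_jotty_autonomous.py | _extract_techniques
-- ===== SOURCE A (Python) =====
-- from typing import Dict, Any, List
--
-- def _extract_techniques(findings: List[Dict]) -> List[str]:
--     """Extract unique technique names from research findings."""
--     techniques = set()
--
--     # Known winning techniques for Titanic (discovered through research)
--     known_techniques = [
--         'title_extraction', 'family_features', 'fare_binning', 'age_imputation',
--         'xgboost', 'lightgbm', 'catboost', 'gradient_boosting',
--         'stacking', 'blending', 'voting_ensemble',
--         'optuna_tuning', 'cross_validation',
--         'feature_selection', 'target_encoding'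
--     ]
--
--     for finding in findings:
--         if isinstance(finding, dict):
--             name = finding.get('name', '')
--             text = finding.get('text', '')
--             combined = f"{name} {text}".lower()
--
--             for tech in known_techniques:
--                 if tech.replace('_', ' ') in combined or tech in combined:
--                     techniques.add(tech)
--
--     # Always include core winning techniques discovered through research
--     techniques.update(['xgboost', 'lightgbm', 'stacking', 'optuna_tuning'])
--
--     return list(techniques)
-- ===== SOURCE B (Python) =====
-- from typing import Dict, Any, List
--
-- def _extract_techniques(findings: List[Dict]) -> List[str]:
--     """Extract unique technique names from research findings."""
--     known_techniques = [
--         'title_extraction', 'family_features', 'fare_binning', 'age_imputation',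
--         'xgboost', 'lightgbm', 'catboost', 'gradient_boosting',
--         'stacking', 'blending', 'voting_ensemble',
--         'optuna_tuning', 'cross_validation',
--         'feature_selection', 'target_encoding'
--     ]
--
--     # One combined blob; '\n' separator keeps matches from spanning two findings.
--     blob = "\n".join(
--         f"{finding.get('name', '')} {finding.get('text', '')}".lower()
--         for finding in findings if isinstance(finding, dict)
--     )
--
--     techniques = {tech for tech in known_techniques
--                   if tech.replace('_', ' ') in blob or tech in blob}
--     techniques.update(['xgboost', 'lightgbm', 'stacking', 'optuna_tuning'])
--     return list(techniques)
-- ===== Notes on version B (the rewrite author's own statement) =====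
-- stated objective: alternative
-- what changed: B replaces A's nested per-finding scan of all 15 techniques with a single build-then-scan pass: it joins all lowered 'name text' strings into one '\n'-separated blob and runs one loop over the techniques against that blob (the newline separator prevents cross-finding matches).
import Mathlib
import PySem

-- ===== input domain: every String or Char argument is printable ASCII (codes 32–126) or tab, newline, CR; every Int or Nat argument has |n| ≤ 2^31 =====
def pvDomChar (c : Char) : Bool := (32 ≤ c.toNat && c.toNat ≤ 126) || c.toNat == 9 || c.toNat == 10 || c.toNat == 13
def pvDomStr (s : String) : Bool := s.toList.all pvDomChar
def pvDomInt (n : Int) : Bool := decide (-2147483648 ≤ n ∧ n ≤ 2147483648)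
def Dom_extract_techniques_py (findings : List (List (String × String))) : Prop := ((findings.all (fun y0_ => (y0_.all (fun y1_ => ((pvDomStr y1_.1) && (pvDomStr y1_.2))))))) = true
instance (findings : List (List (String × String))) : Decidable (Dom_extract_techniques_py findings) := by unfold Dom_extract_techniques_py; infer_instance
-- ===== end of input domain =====

-- B builds one '\n'-joined lowercase blob of all findings and scans each technique once against it,
-- instead of A's nested per-finding × per-technique loop (same cost, different shape).
-- Both Pythons return list(<set>), whose iteration order Python leaves unspecified; both ports
-- therefore return the set's elements sorted (outputs are compared as sets).


-- the literal list both Pythons carry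
def pvKnown : List String :=
  ["title_extraction", "family_features", "fare_binning", "age_imputation",
   "xgboost", "lightgbm", "catboost", "gradient_boosting",
   "stacking", "blending", "voting_ensemble",
   "optuna_tuning", "cross_validation",
   "feature_selection", "target_encoding"]

def pvCore : List String := ["xgboost", "lightgbm", "stacking", "optuna_tuning"]

-- dict.get(k, '') on an insertion-ordered assoc list: first match, '' if absent
def pvGet (d : List (String × String)) (k : String) : String := (d.lookup k).getD ""

-- ===== PORT A =====
-- strings are handled as List Char via PySem.Chars (exact); f"{name} {text}" is name ++ ' ' :: text
def extract_techniques_py (findings : List (List (String × String))) : List String :=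
  let techniques : PySem.Set String :=
    findings.foldl (fun techniques finding =>
      let name := pvGet finding "name"
      let text := pvGet finding "text"
      let combined := PySem.Chars.lower (name.toList ++ ' ' :: text.toList)
      pvKnown.foldl (fun techniques tech =>
        if PySem.Chars.isIn (PySem.Chars.replace tech.toList ['_'] [' ']) combined
            || PySem.Chars.isIn tech.toList combined
        then PySem.Set.add techniques tech else techniques) techniques)
      PySem.Set.empty
  let techniques := PySem.Set.update techniques pvCore
  -- list(techniques): set iteration order is unspecified in Python; returned sorted (compared as a set)
  PySem.List.sorted techniques (fun x => x) false

-- ===== PORT B =====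
def extract_techniques_py_alt (findings : List (List (String × String))) : List String :=
  let blob : List Char :=
    PySem.Chars.join ['\n'] (findings.map (fun finding =>
      PySem.Chars.lower ((pvGet finding "name").toList
        ++ ' ' :: (pvGet finding "text").toList)))
  let techniques : PySem.Set String :=
    PySem.Set.ofList (pvKnown.filter (fun tech =>
      PySem.Chars.isIn (PySem.Chars.replace tech.toList ['_'] [' ']) blob
        || PySem.Chars.isIn tech.toList blob))
  let techniques := PySem.Set.update techniques pvCore
  -- list(techniques): set iteration order is unspecified in Python; returned sorted (compared as a set)
  PySem.List.sorted techniques (fun x => x) false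

-- ===== PRECONDITION & SPEC =====
def Spec_extract_techniques_py (findings : List (List (String × String))) (out : List String) : Prop := out = extract_techniques_py_alt findings
instance (findings : List (List (String × String))) (out : List String) : Decidable (Spec_extract_techniques_py findings out) := by unfold Spec_extract_techniques_py; infer_instance

-- ===== CLAIM (what is proved, stated in full; the proofs are below) =====
def Claim_equal_extract_techniques_py : Prop := ∀ (findings : List (List (String × String))), Dom_extract_techniques_py findings → Spec_extract_techniques_py findings (extract_techniques_py findings)

-- ===== LEMMAS AND PROOFS =====

-- the lowered "name text" of one finding, and the hit test of one technique against a char list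
def pvCombined (finding : List (String × String)) : List Char :=
  PySem.Chars.lower ((pvGet finding "name").toList
    ++ ' ' :: (pvGet finding "text").toList)

def pvHit (tech : String) (cs : List Char) : Bool :=
  PySem.Chars.isIn (PySem.Chars.replace tech.toList ['_'] [' ']) cs
    || PySem.Chars.isIn tech.toList cs

-- A's set, in the shape the proofs use (definitionally A's fold)
def pvSetA (findings : List (List (String × String))) : PySem.Set String :=
  findings.foldl (fun s f =>
    pvKnown.foldl (fun s tech => if pvHit tech (pvCombined f) then PySem.Set.add s tech else s) s)
    PySem.Set.empty

theorem pvA_eq (findings : List (List (String × String))) :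
    extract_techniques_py findings
      = PySem.List.sorted (PySem.Set.update (pvSetA findings) pvCore) (fun x => x) false := rfl

theorem pvB_eq (findings : List (List (String × String))) :
    extract_techniques_py_alt findings
      = PySem.List.sorted (PySem.Set.update
          (PySem.Set.ofList (pvKnown.filter (fun tech =>
            pvHit tech (PySem.Chars.join ['\n'] (findings.map pvCombined))))) pvCore)
          (fun x => x) false := rfl

-- membership through a conditional-add fold
theorem mem_foldl_add_if (l : List String) (p : String → Bool) :
    ∀ (s : PySem.Set String) (y : String),
      y ∈ l.foldl (fun s t => if p t then PySem.Set.add s t else s) s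
        ↔ y ∈ s ∨ (y ∈ l ∧ p y = true) := by
  induction l with
  | nil => simp
  | cons t ts ih =>
    intro s y
    by_cases hp : p t = true
    · rw [List.foldl_cons, if_pos hp, ih, PySem.Set.mem_add]
      simp only [List.mem_cons]
      constructor
      · rintro ((h | rfl) | h)
        · exact Or.inl h
        · exact Or.inr ⟨Or.inl rfl, hp⟩
        · exact Or.inr ⟨Or.inr h.1, h.2⟩
      · rintro (h | ⟨rfl | h, hy⟩)
        · exact Or.inl (Or.inl h)
        · exact Or.inl (Or.inr rfl)
        · exact Or.inr ⟨h, hy⟩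
    · rw [List.foldl_cons, if_neg hp, ih]
      simp only [List.mem_cons]
      constructor
      · rintro (h | h)
        · exact Or.inl h
        · exact Or.inr ⟨Or.inr h.1, h.2⟩
      · rintro (h | ⟨rfl | h, hy⟩)
        · exact Or.inl h
        · exact absurd hy hp
        · exact Or.inr ⟨h, hy⟩

theorem nodup_foldl_add_if (l : List String) (p : String → Bool) :
    ∀ (s : PySem.Set String), s.Nodup →
      (l.foldl (fun s t => if p t then PySem.Set.add s t else s) s).Nodup := by
  induction l with
  | nil => intro s hs; simpa using hs
  | cons t ts ih =>
    intro s hs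
    simp only [List.foldl_cons]
    by_cases hp : p t = true
    · rw [if_pos hp]; exact ih _ (PySem.Set.nodup_add _ _ hs)
    · rw [if_neg hp]; exact ih _ hs

theorem mem_pvSetA (findings : List (List (String × String))) (y : String) :
    y ∈ pvSetA findings
      ↔ ∃ f ∈ findings, y ∈ pvKnown ∧ pvHit y (pvCombined f) = true := by
  have main : ∀ (fs : List (List (String × String))) (s : PySem.Set String),
      y ∈ fs.foldl (fun s f =>
          pvKnown.foldl (fun s tech => if pvHit tech (pvCombined f) then PySem.Set.add s tech else s) s) s
        ↔ y ∈ s ∨ ∃ f ∈ fs, y ∈ pvKnown ∧ pvHit y (pvCombined f) = true := by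
    intro fs
    induction fs with
    | nil => simp
    | cons f fs ih =>
      intro s
      simp only [List.foldl_cons, ih, mem_foldl_add_if, List.mem_cons]
      constructor
      · rintro ((h | h) | ⟨g, hg, h⟩)
        · exact Or.inl h
        · exact Or.inr ⟨f, Or.inl rfl, h.1, h.2⟩
        · exact Or.inr ⟨g, Or.inr hg, h⟩
      · rintro (h | ⟨g, rfl | hg, h⟩)
        · exact Or.inl (Or.inl h)
        · exact Or.inl (Or.inr ⟨h.1, h.2⟩)
        · exact Or.inr ⟨g, hg, h⟩
  simpa [pvSetA] using (main findings PySem.Set.empty)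

theorem nodup_pvSetA (findings : List (List (String × String))) : (pvSetA findings).Nodup := by
  have main : ∀ (fs : List (List (String × String))) (s : PySem.Set String), s.Nodup →
      (fs.foldl (fun s f =>
          pvKnown.foldl (fun s tech => if pvHit tech (pvCombined f) then PySem.Set.add s tech else s) s) s).Nodup := by
    intro fs
    induction fs with
    | nil => intro s hs; simpa using hs
    | cons f fs ih =>
      intro s hs
      simp only [List.foldl_cons]
      exact ih _ (nodup_foldl_add_if _ _ _ hs)
  exact main findings PySem.Set.empty List.nodup_nil

-- a prefix of a ++ c :: b that avoids c is a prefix of a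
theorem prefix_avoid {s a b : List Char} {c : Char} (hc : c ∉ s)
    (h : s <+: a ++ c :: b) : s <+: a := by
  by_cases hl : s.length ≤ a.length
  · exact List.prefix_of_prefix_length_le h (List.prefix_append a (c :: b)) hl
  · exfalso
    have hlen : a.length < s.length := by omega
    have hlt : a.length < (a ++ c :: b).length := by simp
    have hs : s[a.length]'hlen = (a ++ c :: b)[a.length]'hlt := List.IsPrefix.getElem h hlen
    have hcc : (a ++ c :: b)[a.length]'hlt = c := by
      rw [List.getElem_append_right (le_refl a.length)]
      simp
    exact hc (by rw [← hcc, ← hs]; exact List.getElem_mem hlen)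

-- an infix of a ++ c :: b that avoids c is an infix of a or of b
theorem infix_append_cons {s a b : List Char} {c : Char} (hc : c ∉ s) :
    s <:+: a ++ c :: b ↔ s <:+: a ∨ s <:+: b := by
  constructor
  · intro h
    have h1 : PySem.Chars.isIn s (a ++ c :: b) = true := (PySem.Chars.isIn_iff_infix _ _).mpr h
    obtain ⟨j, hj⟩ := (PySem.Chars.exists_prefix_drop_iff_isIn s (a ++ c :: b)).mpr h1
    by_cases hja : j ≤ a.length
    · rw [List.drop_append_of_le_length hja] at hj
      have := prefix_avoid hc hj
      exact Or.inl (this.isInfix.trans (List.drop_suffix j a).isInfix)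
    · replace hja : a.length < j := by omega
      rw [show a ++ c :: b = (a ++ [c]) ++ b from by simp, List.drop_append] at hj
      rw [List.drop_eq_nil_of_le (by simp; omega), List.nil_append] at hj
      exact Or.inr (hj.isInfix.trans (List.drop_suffix _ b).isInfix)
  · rintro (h | h)
    · exact h.trans (List.prefix_append a (c :: b)).isInfix
    · exact h.trans ((List.suffix_cons c b).trans (List.suffix_append_of_suffix (List.suffix_refl _))).isInfix

-- a newline-free nonempty pattern is in the '\n'-joined blob iff it is in one of the parts
theorem infix_join_iff {s : List Char} (hc : '\n' ∉ s) (hne : s ≠ []) :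
    ∀ (parts : List (List Char)),
      s <:+: PySem.Chars.join ['\n'] parts ↔ ∃ p ∈ parts, s <:+: p := by
  intro parts
  induction parts with
  | nil =>
    simp only [PySem.Chars.join_nil, List.mem_nil_iff]
    constructor
    · intro h; exact absurd (List.eq_nil_of_infix_nil h) hne
    · rintro ⟨p, hp, _⟩; exact absurd hp (by simp)
  | cons p rest ih =>
    cases rest with
    | nil =>
      simp [PySem.Chars.join_singleton]
    | cons q rest' =>
      have hj : PySem.Chars.join ['\n'] (p :: q :: rest')
          = p ++ '\n' :: PySem.Chars.join ['\n'] (q :: rest') := by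
        rw [PySem.Chars.join_cons_cons]; simp
      rw [hj, infix_append_cons hc, ih]
      constructor
      · rintro (h | ⟨r, hr, h⟩)
        · exact ⟨p, by simp, h⟩
        · exact ⟨r, by simp [hr], h⟩
      · rintro ⟨r, hr, h⟩
        rcases List.mem_cons.mp hr with rfl | hr
        · exact Or.inl h
        · exact Or.inr ⟨r, hr, h⟩

-- every known technique, in both forms, is nonempty and newline-free
theorem pvKnown_ok : ∀ t ∈ pvKnown,
    (t.toList ≠ [] ∧ '\n' ∉ t.toList)
      ∧ (PySem.Chars.replace t.toList ['_'] [' '] ≠ []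
          ∧ '\n' ∉ PySem.Chars.replace t.toList ['_'] [' ']) := by decide

-- a known technique hits the blob iff it hits some finding's combined text
theorem pvHit_join (t : String) (ht : t ∈ pvKnown) (findings : List (List (String × String))) :
    pvHit t (PySem.Chars.join ['\n'] (findings.map pvCombined)) = true
      ↔ ∃ f ∈ findings, pvHit t (pvCombined f) = true := by
  obtain ⟨⟨hne1, hnl1⟩, hne2, hnl2⟩ := pvKnown_ok t ht
  simp only [pvHit, Bool.or_eq_true, PySem.Chars.isIn_iff_infix]
  rw [infix_join_iff hnl2 hne2, infix_join_iff hnl1 hne1]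
  constructor
  · rintro (⟨p, hp, h⟩ | ⟨p, hp, h⟩) <;>
      obtain ⟨f, hf, rfl⟩ := List.mem_map.mp hp
    · exact ⟨f, hf, Or.inl h⟩
    · exact ⟨f, hf, Or.inr h⟩
  · rintro ⟨f, hf, h | h⟩
    · exact Or.inl ⟨pvCombined f, List.mem_map.mpr ⟨f, hf, rfl⟩, h⟩
    · exact Or.inr ⟨pvCombined f, List.mem_map.mpr ⟨f, hf, rfl⟩, h⟩

-- ===== VERDICT (by name: the statement is the Claim_ definition above) =====
theorem extract_techniques_py_spec : Claim_equal_extract_techniques_py := by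
  intro findings _
  unfold Spec_extract_techniques_py
  rw [pvA_eq, pvB_eq]
  apply PySem.List.sorted_eq_sorted_of_perm
  · exact fun _ _ h => h
  · apply (List.perm_ext_iff_of_nodup
      (PySem.Set.nodup_update _ _ (nodup_pvSetA findings))
      (PySem.Set.nodup_update _ _ (PySem.Set.nodup_ofList _))).mpr
    intro y
    simp only [PySem.Set.mem_update, mem_pvSetA, PySem.Set.mem_ofList, List.mem_filter]
    constructor
    · rintro (⟨f, hf, hk, hh⟩ | h)
      · exact Or.inl ⟨hk, (pvHit_join y hk findings).mpr ⟨f, hf, hh⟩⟩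
      · exact Or.inr h
    · rintro (⟨hk, hh⟩ | h)
      · obtain ⟨f, hf, hh⟩ := (pvHit_join y hk findings).mp hh
        exact Or.inl ⟨f, hf, hk, hh⟩
      · exact Or.inr h
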